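-- pv_equiv track=rewrite | github.com/pypi-data/pypi-mirror-403 | packages/opencc-pyo3/opencc_pyo3-0.8.5-cp38-abi3-macosx_11_0_arm64.whl/opencc_pyo3/pdfium_helper.py | _compress_newlines
-- ===== SOURCE A (Python) =====
-- def _compress_newlines(text: str) -> str:
--     """
--     Reduce sequences of multiple newline characters to a maximum of two.
--     This ensures:
--       - Single '\n' = line break.
--       - Double '\n\n' = paragraph boundary.
--       - Prevents excessive blank-space inflation from Pdfium output.
--     """
--     out = []
--     seen = 0
--
--     for ch in text:
--         if ch == "\n":
--             seen += 1
--             if seen <= 2: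
--                 out.append("\n")
--         else:
--             seen = 0
--             out.append(ch)
--
--     return "".join(out)
-- ===== SOURCE B (Python) =====
-- def _compress_newlines(text: str) -> str:
--     # Run-based: split the string into maximal runs of identical characters,
--     # emit each run unchanged except newline runs, which are capped at 2.
--     pieces = []
--     i = 0
--     n = len(text)
--     while i < n:
--         ch = text[i]
--         j = i
--         while j < n and text[j] == ch:
--             j += 1
--         run = j - i
--         if ch == "\n":
--             pieces.append("\n" * min(run, 2))
--         else:
--             pieces.append(ch * run)
--         i = j
--     return "".join(pieces)
-- ===== Notes on version B (the rewrite author's own statement) =====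
-- stated objective: alternative
-- what changed: B splits the string into maximal runs of identical characters and emits each run at once (newline runs capped at 2), instead of A's per-character loop with a running newline counter.
import Mathlib
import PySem

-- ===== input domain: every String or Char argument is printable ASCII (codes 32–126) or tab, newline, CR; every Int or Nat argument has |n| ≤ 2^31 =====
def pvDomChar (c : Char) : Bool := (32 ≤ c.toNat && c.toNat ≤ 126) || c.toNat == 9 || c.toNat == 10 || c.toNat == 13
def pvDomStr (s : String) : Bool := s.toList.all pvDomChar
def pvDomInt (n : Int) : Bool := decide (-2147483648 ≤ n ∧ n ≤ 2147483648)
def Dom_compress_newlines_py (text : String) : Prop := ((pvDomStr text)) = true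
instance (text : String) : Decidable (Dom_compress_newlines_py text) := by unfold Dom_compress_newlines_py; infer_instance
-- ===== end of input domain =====

-- ===== PORT A =====
-- B changes the decomposition: maximal equal-character runs emitted at once instead of
-- A's per-character loop with a newline counter; same O(n) cost ("alternative").

-- A's loop: per character, a newline counter `seen`, appending to `out`.
def pvALoop : List Char → Nat → List Char → List Char
  | [], _, out => out
  | c :: rest, seen, out =>
    if c = '\n' then
      pvALoop rest (seen + 1) (if seen + 1 ≤ 2 then out ++ ['\n'] else out)
    else
      pvALoop rest 0 (out ++ [c])

def compress_newlines_py (text : String) : String :=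
  String.mk (pvALoop text.toList 0 [])

-- ===== PORT B =====
-- B: split off the maximal run of the leading character, emit it (newline runs capped at 2).
def pvTakeRun (c : Char) : List Char → Nat × List Char
  | [] => (0, [])
  | x :: rest => if x = c then ((pvTakeRun c rest).1 + 1, (pvTakeRun c rest).2) else (0, x :: rest)

theorem pvTakeRun_len (c : Char) : ∀ l : List Char, (pvTakeRun c l).2.length ≤ l.length := by
  intro l
  induction l with
  | nil => simp [pvTakeRun]
  | cons x rest ih =>
    simp only [pvTakeRun]
    split
    · exact Nat.le_trans ih (Nat.le_succ _)
    · simp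

def pvBLoop : List Char → List Char
  | [] => []
  | c :: rest =>
    (if c = '\n' then List.replicate (min ((pvTakeRun c rest).1 + 1) 2) '\n'
     else List.replicate ((pvTakeRun c rest).1 + 1) c) ++ pvBLoop (pvTakeRun c rest).2
termination_by l => l.length
decreasing_by
  exact Nat.lt_succ_of_le (pvTakeRun_len _ _)

def compress_newlines_py_alt (text : String) : String :=
  String.mk (pvBLoop text.toList)

-- ===== PRECONDITION & SPEC =====
def Spec_compress_newlines_py (text : String) (out : String) : Prop := out = compress_newlines_py_alt text
instance (text : String) (out : String) : Decidable (Spec_compress_newlines_py text out) := by unfold Spec_compress_newlines_py; infer_instance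

-- ===== CLAIM (what is proved, stated in full; the proofs are below) =====
def Claim_equal_compress_newlines_py : Prop := ∀ (text : String), Dom_compress_newlines_py text → Spec_compress_newlines_py text (compress_newlines_py text)

-- ===== LEMMAS AND PROOFS =====

-- A without the accumulator.
def pvARun : List Char → Nat → List Char
  | [], _ => []
  | c :: rest, seen =>
    if c = '\n' then
      (if seen + 1 ≤ 2 then '\n' :: pvARun rest (seen + 1) else pvARun rest (seen + 1))
    else c :: pvARun rest 0

theorem pvALoop_eq : ∀ (l : List Char) (seen : Nat) (out : List Char),
    pvALoop l seen out = out ++ pvARun l seen := by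
  intro l
  induction l with
  | nil => intro seen out; simp [pvALoop, pvARun]
  | cons c rest ih =>
    intro seen out
    simp only [pvALoop, pvARun]
    split
    · split <;> simp [ih]
    · simp [ih]

theorem pvTakeRun_eq (c : Char) : ∀ l : List Char,
    List.replicate (pvTakeRun c l).1 c ++ (pvTakeRun c l).2 = l := by
  intro l
  induction l with
  | nil => simp [pvTakeRun]
  | cons x rest ih =>
    simp only [pvTakeRun]
    split
    · rename_i h; simp [List.replicate_succ, ih, h]
    · simp

theorem pvTakeRun_head (c : Char) : ∀ l : List Char, (pvTakeRun c l).2.head? ≠ some c := by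
  intro l
  induction l with
  | nil => simp [pvTakeRun]
  | cons x rest ih =>
    simp only [pvTakeRun]
    split
    · exact ih
    · rename_i h; simpa using h

theorem pvARun_reset (r : List Char) (s : Nat) (h : r.head? ≠ some '\n') :
    pvARun r s = pvARun r 0 := by
  cases r with
  | nil => rfl
  | cons x rest =>
    have hx : ¬ x = '\n' := by simpa using h
    simp [pvARun, hx]

theorem pvARun_nonNl (c : Char) (h : ¬ c = '\n') : ∀ (n : Nat) (r : List Char),
    pvARun (List.replicate n c ++ r) 0 = List.replicate n c ++ pvARun r 0 := by
  intro n
  induction n with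
  | zero => intro r; simp
  | succ k ih =>
    intro r
    simp [List.replicate_succ, pvARun, h, ih]

theorem pvARun_nl : ∀ (k s : Nat) (r : List Char), r.head? ≠ some '\n' →
    pvARun (List.replicate k '\n' ++ r) s
      = List.replicate (min (s + k) 2 - s) '\n' ++ pvARun r 0 := by
  intro k
  induction k with
  | zero =>
    intro s r h
    have : min (s + 0) 2 - s = 0 := by omega
    simp [pvARun_reset r s h]
  | succ k ih =>
    intro s r h
    simp only [List.replicate_succ, List.cons_append, pvARun]
    rw [ih (s + 1) r h]
    by_cases hs : s + 1 ≤ 2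
    · rw [if_pos hs]
      have : min (s + (k + 1)) 2 - s = (min (s + 1 + k) 2 - (s + 1)) + 1 := by omega
      rw [this, List.replicate_succ]
      simp
    · rw [if_neg hs]
      have h1 : min (s + 1 + k) 2 - (s + 1) = 0 := by omega
      have h2 : min (s + (k + 1)) 2 - s = 0 := by omega
      rw [h1, h2]
      simp

theorem pvARun_eq_pvBLoop : ∀ l : List Char, pvARun l 0 = pvBLoop l := by
  intro l
  induction l using pvBLoop.induct with
  | case1 => rw [pvBLoop]; rfl
  | case2 c rest ih =>
    rw [pvBLoop]
    have hsplit : c :: rest = List.replicate ((pvTakeRun c rest).1 + 1) c ++ (pvTakeRun c rest).2 := by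
      rw [List.replicate_succ]
      simp [pvTakeRun_eq c rest]
    by_cases hc : c = '\n'
    · subst hc
      rw [if_pos rfl, hsplit]
      rw [pvARun_nl ((pvTakeRun '\n' rest).1 + 1) 0 _ (pvTakeRun_head '\n' rest)]
      simp [ih]
    · rw [if_neg hc, hsplit]
      rw [pvARun_nonNl c hc]
      simp [ih]

-- ===== VERDICT (by name: the statement is the Claim_ definition above) =====
theorem compress_newlines_py_spec : Claim_equal_compress_newlines_py := by
  intro text _
  unfold Spec_compress_newlines_py compress_newlines_py compress_newlines_py_alt
  rw [pvALoop_eq, pvARun_eq_pvBLoop]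
  rfl
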